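-- pv_equiv track=rewrite | github.com/adjkamel/segsim | model_fusion.py | nearest_even_value_and_divisor
-- ===== SOURCE A (Python) =====
-- def nearest_even_value_and_divisor(n):
--
--     list_nearest=[n,n+1,n-1]
--
--
--     for k in list_nearest:
--         list_divisors=[]
--         for i in range (4,k):
--             if k%i==0:
--                 list_divisors.append(i)
--         if len(list_divisors)>0:
--             divisor=int(min(list_divisors))
--             nearest=k
--             break
--
--     return nearest, divisor
-- ===== SOURCE B (Python) =====
-- import math
--
-- def _smallest_div_ge4(k):
--     # smallest divisor d of k with 4 <= d < k, or None.
--     if k < 5: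
--         return None
--     r = math.isqrt(k)
--     d = next((i for i in range(4, r + 1) if k % i == 0), None)
--     if d is not None:
--         return d
--     # no divisor in [4, isqrt(k)]: any divisor in [4, k) has cofactor in {2, 3}
--     if k % 3 == 0 and k // 3 >= 4:
--         return k // 3
--     if k % 2 == 0 and k // 2 >= 4:
--         return k // 2
--     return None
--
-- def nearest_even_value_and_divisor(n):
--     for k in (n, n + 1, n - 1):
--         d = _smallest_div_ge4(k)
--         if d is not None:
--             return k, d
--     raise ValueError("no candidate with a divisor in [4, k)")
-- ===== Notes on version B (the rewrite author's own statement) =====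
-- stated objective: faster
-- what changed: Instead of scanning every i in [4, k) and taking the min, B trial-divides only up to isqrt(k) and otherwise derives the smallest divisor >= 4 from the cofactors k//3 and k//2.
import Mathlib
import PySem

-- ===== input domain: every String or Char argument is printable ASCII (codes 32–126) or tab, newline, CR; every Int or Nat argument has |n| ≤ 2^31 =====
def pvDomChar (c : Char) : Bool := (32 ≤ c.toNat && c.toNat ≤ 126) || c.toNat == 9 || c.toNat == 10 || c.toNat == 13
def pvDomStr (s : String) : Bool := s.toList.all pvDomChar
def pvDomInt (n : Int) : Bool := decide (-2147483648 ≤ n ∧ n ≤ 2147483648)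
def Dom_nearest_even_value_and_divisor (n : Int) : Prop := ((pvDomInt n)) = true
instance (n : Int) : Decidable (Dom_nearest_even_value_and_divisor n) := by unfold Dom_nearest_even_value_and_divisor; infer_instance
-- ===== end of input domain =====

-- B replaces A's scan of every i in [4, k) by trial division up to isqrt(k) plus a
-- cofactor check (k//3, k//2), returning the same (nearest, divisor) pair.

-- ===== PORT A =====
-- inner loop: for i in range(4, k): if k % i == 0: list_divisors.append(i)
def pvA_divs (k : Int) : List Int :=
  (PySem.List.pyRange 4 k 1).foldl
    (fun acc i => if PySem.Int.mod k i = 0 then acc ++ [i] else acc) []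

-- for k in list_nearest: … break   (empty case = A's UnboundLocalError, excluded by Pre_)
def pvA_loop : List Int → List Int
  | [] => []
  | k :: rest =>
    let ds := pvA_divs k
    if 0 < ds.length then [k, (PySem.List.min? ds (fun x => x)).getD 0]
    else pvA_loop rest

def nearest_even_value_and_divisor (n : Int) : List Int :=
  pvA_loop [n, n + 1, n - 1]

-- ===== PORT B =====
-- smallest divisor d of k with 4 <= d < k, or none (Source B's _smallest_div_ge4)
def pvB_small (k : Int) : Option Int :=
  if k < 5 then none
  else
    match (PySem.List.pyRange 4 ((Nat.sqrt k.toNat : Int) + 1) 1).find?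
        (fun i => PySem.Int.mod k i == 0) with
    | some d => some d
    | none =>
      if PySem.Int.mod k 3 = 0 ∧ 4 ≤ PySem.Int.floordiv k 3 then some (PySem.Int.floordiv k 3)
      else if PySem.Int.mod k 2 = 0 ∧ 4 ≤ PySem.Int.floordiv k 2 then some (PySem.Int.floordiv k 2)
      else none

-- for k in (n, n+1, n-1): …   (empty case = Source B's ValueError, excluded by Pre_)
def pvB_loop : List Int → List Int
  | [] => []
  | k :: rest =>
    match pvB_small k with
    | some d => [k, d]
    | none => pvB_loop rest

def nearest_even_value_and_divisor_alt (n : Int) : List Int :=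
  pvB_loop [n, n + 1, n - 1]

-- ===== PRECONDITION & SPEC =====
-- "k has a divisor in [4, k)", stated in closed form: true exactly for k = 8 and for
-- composite k ≥ 10 (a composite k ≥ 10 has a divisor k/p ≥ √k > 3, and 4, 6, 9 have none).
def pvHasDiv (k : Int) : Prop :=
  k = 8 ∨ (10 ≤ k ∧ ¬ Nat.Prime k.toNat)

-- Pre_ excludes exactly the inputs where none of n, n+1, n-1 has a divisor in [4, k):
-- there A raises UnboundLocalError (and B raises ValueError).
def Pre_nearest_even_value_and_divisor (n : Int) : Prop :=
  pvHasDiv n ∨ pvHasDiv (n + 1) ∨ pvHasDiv (n - 1)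
instance (n : Int) : Decidable (Pre_nearest_even_value_and_divisor n) := by
  unfold Pre_nearest_even_value_and_divisor pvHasDiv; infer_instance

def pvWitness_nearest_even_value_and_divisor : Int := 12

def Spec_nearest_even_value_and_divisor (n : Int) (out : List Int) : Prop := out = nearest_even_value_and_divisor_alt n
instance (n : Int) (out : List Int) : Decidable (Spec_nearest_even_value_and_divisor n out) := by unfold Spec_nearest_even_value_and_divisor; infer_instance

-- ===== CLAIM (what is proved, stated in full; the proofs are below) =====
def Claim_equal_nearest_even_value_and_divisor : Prop := ∀ (n : Int), Dom_nearest_even_value_and_divisor n → Pre_nearest_even_value_and_divisor n → Spec_nearest_even_value_and_divisor n (nearest_even_value_and_divisor n)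

-- ===== LEMMAS AND PROOFS =====

-- the first i in [4, k) dividing k: common characterisation of both per-k computations
def pvFirstD (k : Int) : Option Int :=
  (PySem.List.pyRange 4 k 1).find? (fun i => PySem.Int.mod k i == 0)

lemma pv_foldl_min_of_le {x : Int} : ∀ {t : List Int}, (∀ y ∈ t, x ≤ y) → t.foldl min x = x := by
  intro t
  induction t with
  | nil => intro _; rfl
  | cons a t ih =>
    intro h
    have hxa : min x a = x := min_eq_left (h a (by simp))
    simp only [List.foldl_cons, hxa]
    exact ih (fun y hy => h y (by simp [hy]))

lemma pv_min?_of_pairwise_lt {l : List Int} (hl : l.Pairwise (· < ·)) :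
    PySem.List.min? l (fun x => x) = l.head? := by
  cases l with
  | nil => rfl
  | cons x t =>
    rw [PySem.List.min?_id_cons]
    have : t.foldl min x = x :=
      pv_foldl_min_of_le (fun y hy => le_of_lt ((List.pairwise_cons.mp hl).1 y hy))
    simp [this]

lemma pv_head?_filter {α : Type} (p : α → Bool) : ∀ (l : List α),
    (l.filter p).head? = l.find? p := by
  intro l
  induction l with
  | nil => rfl
  | cons a t ih => by_cases h : p a <;> simp [h, ih]

lemma pv_LA (k : Int) :
    PySem.List.min? (pvA_divs k) (fun x => x) = pvFirstD k := by
  have hpred : (fun i => decide (PySem.Int.mod k i = 0)) = (fun i => PySem.Int.mod k i == 0) := by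
    funext i
    cases h : (PySem.Int.mod k i == 0) <;> simp_all
  have hfilter : pvA_divs k
      = (PySem.List.pyRange 4 k 1).filter (fun i => PySem.Int.mod k i == 0) := by
    unfold pvA_divs
    rw [PySem.List.foldl_append_ite_eq_filter, hpred]
    rfl
  rw [hfilter, pv_min?_of_pairwise_lt
    ((PySem.List.pairwise_lt_pyRange_one 4 k).filter _), pvFirstD, pv_head?_filter]

lemma pv_find?_range_some {p : Int → Bool} : ∀ (c : Nat) (a b m : Int),
    (m - a).toNat = c → a ≤ m → m < b → p m = true →
    (∀ j, a ≤ j → j < m → p j = false) →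
    (PySem.List.pyRange a b 1).find? p = some m := by
  intro c
  induction c with
  | zero =>
    intro a b m h0 h1 h2 hp hmin
    have ham : a = m := by omega
    subst ham
    rw [PySem.List.pyRange_one_cons (by omega)]
    simp [hp]
  | succ c ih =>
    intro a b m h0 h1 h2 hp hmin
    have ham : a < m := by omega
    rw [PySem.List.pyRange_one_cons (by omega)]
    have hpa : p a = false := hmin a le_rfl ham
    simp only [List.find?_cons, hpa]
    exact ih (a + 1) b m (by omega) (by omega) h2 hp (fun j hj1 hj2 => hmin j (by omega) hj2)

lemma pv_dvd_iff (k i : Int) : ((PySem.Int.mod k i == 0) = true) ↔ i ∣ k := by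
  rw [beq_iff_eq, PySem.Int.mod_eq_zero_iff_dvd]

lemma pv_floordiv_exact {k b : Int} (hb : 0 < b) (h : b ∣ k) :
    k = b * PySem.Int.floordiv k b := by
  rw [PySem.Int.floordiv_eq_ediv_of_pos hb]
  exact (Int.mul_ediv_cancel' h).symm

lemma pv_LB (k : Int) : pvB_small k = pvFirstD k := by
  unfold pvB_small pvFirstD
  by_cases hk : k < 5
  · rw [if_pos hk, PySem.List.pyRange_one_eq_nil (by omega)]
    rfl
  · rw [if_neg hk]
    push_neg at hk
    by_cases hk9 : k < 9
    · have hs : ((Nat.sqrt k.toNat : Nat) : Int) = 2 := by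
        have h1 : 2 ≤ Nat.sqrt k.toNat := Nat.le_sqrt.mpr (by omega)
        have h2 : Nat.sqrt k.toNat < 3 :=
          Nat.sqrt_lt'.mpr (lt_of_lt_of_eq (by omega : k.toNat < 9) (by norm_num))
        omega
      rw [hs, PySem.List.pyRange_one_eq_nil (by norm_num)]
      interval_cases k <;> decide
    · push_neg at hk9
      set r : Int := ((Nat.sqrt k.toNat : Nat) : Int) with hrdef
      have hkc : (k.toNat : Int) = k := Int.toNat_of_nonneg (by omega)
      have hr1 : r * r ≤ k := by
        have h := Nat.sqrt_le' k.toNat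
        rw [pow_two] at h
        rw [hrdef, ← hkc]
        exact_mod_cast h
      have hr2 : k < (r + 1) * (r + 1) := by
        have h := Nat.lt_succ_sqrt' k.toNat
        rw [pow_two, Nat.succ_eq_add_one] at h
        calc k = (k.toNat : Int) := hkc.symm
          _ < (((Nat.sqrt k.toNat + 1) * (Nat.sqrt k.toNat + 1) : Nat) : Int) := by exact_mod_cast h
          _ = (r + 1) * (r + 1) := by push_cast; ring
      have hr3 : 3 ≤ r := by
        have : 3 ≤ Nat.sqrt k.toNat := Nat.le_sqrt.mpr (by omega)
        omega
      have hrk : r + 1 ≤ k := by nlinarith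
      rw [PySem.List.pyRange_one_append 4 (r + 1) k (by omega) hrk, List.find?_append]
      cases hscan : (PySem.List.pyRange 4 (r + 1) 1).find? (fun i => PySem.Int.mod k i == 0) with
      | some d => rfl
      | none =>
        show (if PySem.Int.mod k 3 = 0 ∧ 4 ≤ PySem.Int.floordiv k 3 then some (PySem.Int.floordiv k 3)
              else if PySem.Int.mod k 2 = 0 ∧ 4 ≤ PySem.Int.floordiv k 2 then some (PySem.Int.floordiv k 2)
              else none)
            = Option.or none ((PySem.List.pyRange (r + 1) k 1).find? (fun i => PySem.Int.mod k i == 0))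
        rw [Option.none_or]
        have hnos : ∀ i, 4 ≤ i → i ≤ r → ¬ i ∣ k := by
          intro i h4 hir hdvd
          have hmem : i ∈ PySem.List.pyRange 4 (r + 1) 1 :=
            (PySem.List.mem_pyRange_one).mpr ⟨h4, by omega⟩
          exact List.find?_eq_none.mp hscan i hmem ((pv_dvd_iff k i).mpr hdvd)
        -- any divisor of k strictly between r and k has cofactor 2 or 3
        have hfact : ∀ d, r < d → d < k → d ∣ k → k = 2 * d ∨ k = 3 * d := by
          intro d hrd hdk hdvd
          obtain ⟨e, he⟩ := hdvd
          have hd0 : 0 < d := by omega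
          have he0 : 0 < e := by
            by_contra h
            push_neg at h
            have : d * e ≤ 0 := mul_nonpos_of_nonneg_of_nonpos (le_of_lt hd0) h
            omega
          have her : e ≤ r := by
            by_contra h
            push_neg at h
            have : (r + 1) * (r + 1) ≤ d * e :=
              mul_le_mul (by omega) (by omega) (by omega) (by omega)
            omega
          have hene : ¬ (4 ≤ e) := fun h4 => hnos e h4 her ⟨d, by rw [he]; ring⟩
          have he3 : e ≤ 3 := by omega
          interval_cases e <;> omega
        by_cases h3 : PySem.Int.mod k 3 = 0 ∧ 4 ≤ PySem.Int.floordiv k 3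
        · rw [if_pos h3]
          obtain ⟨h3m, h34⟩ := h3
          have h3d : (3 : Int) ∣ k := (PySem.Int.mod_eq_zero_iff_dvd k 3).mp h3m
          have hk3 : k = 3 * PySem.Int.floordiv k 3 := pv_floordiv_exact (by norm_num) h3d
          have hd3dvd : PySem.Int.floordiv k 3 ∣ k := ⟨3, by omega⟩
          have hd3r : r < PySem.Int.floordiv k 3 := by
            by_contra h
            push_neg at h
            exact hnos _ h34 h hd3dvd
          symm
          apply pv_find?_range_some (PySem.Int.floordiv k 3 - (r + 1)).toNat (r + 1) k _ rfl
            (by omega) (by omega) ((pv_dvd_iff k _).mpr hd3dvd)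
          intro j hj1 hj2
          rw [← Bool.not_eq_true, pv_dvd_iff]
          intro hjd
          rcases hfact j (by omega) (by omega) hjd with h2j | h3j <;> omega
        · rw [if_neg h3]
          by_cases h2 : PySem.Int.mod k 2 = 0 ∧ 4 ≤ PySem.Int.floordiv k 2
          · rw [if_pos h2]
            obtain ⟨h2m, h24⟩ := h2
            have h2d : (2 : Int) ∣ k := (PySem.Int.mod_eq_zero_iff_dvd k 2).mp h2m
            have hk2 : k = 2 * PySem.Int.floordiv k 2 := pv_floordiv_exact (by norm_num) h2d
            have hd2dvd : PySem.Int.floordiv k 2 ∣ k := ⟨2, by omega⟩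
            have hd2r : r < PySem.Int.floordiv k 2 := by
              by_contra h
              push_neg at h
              exact hnos _ h24 h hd2dvd
            symm
            apply pv_find?_range_some (PySem.Int.floordiv k 2 - (r + 1)).toNat (r + 1) k _ rfl
              (by omega) (by omega) ((pv_dvd_iff k _).mpr hd2dvd)
            intro j hj1 hj2
            rw [← Bool.not_eq_true, pv_dvd_iff]
            intro hjd
            rcases hfact j (by omega) (by omega) hjd with h2j | h3j
            · omega
            · -- k = 3 * j: then k // 3 = j ≥ r + 1 ≥ 4, so the 3-branch would have fired
              have h3dk : (3 : Int) ∣ k := ⟨j, h3j⟩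
              have hj3 : PySem.Int.floordiv k 3 = j := by
                have := pv_floordiv_exact (b := 3) (k := k) (by norm_num) h3dk
                omega
              exact h3 ⟨(PySem.Int.mod_eq_zero_iff_dvd k 3).mpr h3dk, by omega⟩
          · rw [if_neg h2]
            symm
            rw [List.find?_eq_none]
            intro j hjmem
            rw [pv_dvd_iff]
            intro hjd
            have hjb := (PySem.List.mem_pyRange_one).mp hjmem
            rcases hfact j (by omega) (by omega) hjd with h2j | h3j
            · have h2dk : (2 : Int) ∣ k := ⟨j, h2j⟩
              have hj2 : PySem.Int.floordiv k 2 = j := by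
                have := pv_floordiv_exact (b := 2) (k := k) (by norm_num) h2dk
                omega
              exact h2 ⟨(PySem.Int.mod_eq_zero_iff_dvd k 2).mpr h2dk, by omega⟩
            · have h3dk : (3 : Int) ∣ k := ⟨j, h3j⟩
              have hj3 : PySem.Int.floordiv k 3 = j := by
                have := pv_floordiv_exact (b := 3) (k := k) (by norm_num) h3dk
                omega
              exact h3 ⟨(PySem.Int.mod_eq_zero_iff_dvd k 3).mpr h3dk, by omega⟩

lemma pv_loops_eq : ∀ l : List Int, pvA_loop l = pvB_loop l := by
  intro l
  induction l with
  | nil => rfl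
  | cons k rest ih =>
    have hkey : PySem.List.min? (pvA_divs k) (fun x => x) = pvB_small k :=
      (pv_LA k).trans (pv_LB k).symm
    simp only [pvA_loop, pvB_loop]
    cases h : pvB_small k with
    | some d =>
      rw [h] at hkey
      have hne : pvA_divs k ≠ [] := by
        intro hnil
        rw [(PySem.List.min?_eq_none_iff (pvA_divs k) (fun x => x)).mpr hnil] at hkey
        simp at hkey
      rw [if_pos (List.length_pos_iff.mpr hne), hkey]
      rfl
    | none =>
      rw [h] at hkey
      have hnil : pvA_divs k = [] := (PySem.List.min?_eq_none_iff _ _).mp hkey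
      rw [if_neg (by simp [hnil]), ih]

-- ===== VERDICT (by name: the statement is the Claim_ definition above) =====
theorem nearest_even_value_and_divisor_spec : Claim_equal_nearest_even_value_and_divisor := by
  intro n _ _
  exact pv_loops_eq [n, n + 1, n - 1]
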